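-- pv_equiv track=rewrite | github.com/Draekk/testing-git | recursivity.py | generar_combinaciones_clave
-- ===== SOURCE A (Python) =====
-- def generar_combinaciones_clave(digitos_disponibles, clave_actual=[]):
--     # Caso base: si la clave_actual contiene 5 dígitos, hemos encontrado una combinación
--     if len(clave_actual) == 5:
--         return 1
--
--     # Inicializar el contador de combinaciones
--     combinaciones = 0
--
--     # Iterar sobre los dígitos disponibles y generar las combinaciones recursivamente
--     for digito in digitos_disponibles:
--         # Si el dígito ya está en la clave_actual, saltar a la siguiente iteración
--         if digito in clave_actual:
--             continue
--
--         # Agregar el dígito a la clave_actual y generar las combinaciones recursivamente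
--         combinaciones += generar_combinaciones_clave(digitos_disponibles, clave_actual + [digito])
--
--     return combinaciones
-- ===== SOURCE B (Python) =====
-- def generar_combinaciones_clave(digitos_disponibles, clave_actual=[]):
--     k = 5 - len(clave_actual)
--     if k < 0:
--         return 0
--     counts = {}
--     for d in digitos_disponibles:
--         if d not in clave_actual:
--             counts[d] = counts.get(d, 0) + 1
--     e = [1] + [0] * k
--     for m in counts.values():
--         e = [1] + [a + m * b for a, b in zip(e[1:], e)]
--     fact = 1
--     for j in range(1, k + 1):
--         fact *= j
--     return fact * e[k]
-- ===== Notes on version B (the rewrite author's own statement) =====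
-- stated objective: faster
-- what changed: Replaces the exponential branching recursion over partial keys by a closed form: count = k! * e_k of the multiplicities of the still-available distinct values (k = 5 - len(clave_actual)), where e_k is computed by the standard O(n*k) elementary-symmetric-polynomial DP; intended as faster (O(n*k) vs A's n^k branching) — a timing run saw A time out at n=16 where B returned instantly, so no ratio at a common largest size could be measured.
import Mathlib
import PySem

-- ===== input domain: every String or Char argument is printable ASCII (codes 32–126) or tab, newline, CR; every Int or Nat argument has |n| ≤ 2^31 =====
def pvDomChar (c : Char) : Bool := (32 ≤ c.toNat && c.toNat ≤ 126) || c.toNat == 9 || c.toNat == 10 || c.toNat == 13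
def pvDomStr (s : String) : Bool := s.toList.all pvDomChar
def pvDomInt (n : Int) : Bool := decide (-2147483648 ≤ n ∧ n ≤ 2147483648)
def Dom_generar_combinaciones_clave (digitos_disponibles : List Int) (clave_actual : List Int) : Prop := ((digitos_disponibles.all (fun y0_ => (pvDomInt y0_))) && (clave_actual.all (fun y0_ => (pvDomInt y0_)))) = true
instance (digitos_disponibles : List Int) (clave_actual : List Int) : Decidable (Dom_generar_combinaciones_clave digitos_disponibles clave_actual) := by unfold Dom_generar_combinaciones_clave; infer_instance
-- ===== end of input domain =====

-- B replaces A's exponential recursion over partial keys by the closed form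
-- k! * e_k(multiplicities of the available distinct values), e_k computed by the standard DP row.

-- ===== PORT A =====
-- A-side helpers: the termination measure of A's recursion (number of distinct
-- available values not yet used) and the lemma that it decreases.
def pvRest (ds cl : List Int) : List Int := ds.filter (fun x => !cl.contains x)

def pvMu (ds cl : List Int) : Nat := (PySem.List.dedup (pvRest ds cl)).length

theorem pvPermOfNodup {l1 l2 : List Int} (h1 : l1.Nodup) (h2 : l2.Nodup)
    (h : ∀ x, x ∈ l1 ↔ x ∈ l2) : l1.Perm l2 := by
  rw [List.perm_iff_count]
  intro a
  by_cases ha : a ∈ l1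
  · rw [List.count_eq_one_of_mem h1 ha, List.count_eq_one_of_mem h2 ((h a).mp ha)]
  · rw [List.count_eq_zero_of_not_mem ha, List.count_eq_zero_of_not_mem (fun hb => ha ((h a).mpr hb))]

theorem pvRest_append (ds cl : List Int) (d : Int) :
    pvRest ds (cl ++ [d]) = (pvRest ds cl).filter (fun x => !(x == d)) := by
  simp only [pvRest, List.filter_filter]
  apply List.filter_congr
  intro x _
  cases hc : cl.contains x <;> cases hd : x == d <;> simp at hc hd ⊢ <;> simp_all

theorem pvDedupRestPerm (ds cl : List Int) (d : Int) :
    (PySem.List.dedup (pvRest ds (cl ++ [d]))).Perm ((PySem.List.dedup (pvRest ds cl)).erase d) := by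
  apply pvPermOfNodup (PySem.List.nodup_dedup _)
    ((PySem.List.nodup_dedup _).erase d)
  intro x
  rw [pvRest_append, PySem.List.mem_dedup, (PySem.List.nodup_dedup _).mem_erase_iff,
    PySem.List.mem_dedup, List.mem_filter]
  constructor
  · rintro ⟨hx, hxd⟩
    simp at hxd
    exact ⟨hxd, hx⟩
  · rintro ⟨hxd, hx⟩
    refine ⟨hx, by simp [hxd]⟩

theorem pvMu_lt (ds cl : List Int) (d : Int) (hd : d ∈ ds) (hc : cl.contains d = false) :
    pvMu ds (cl ++ [d]) < pvMu ds cl := by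
  have hdr : d ∈ PySem.List.dedup (pvRest ds cl) := by
    rw [PySem.List.mem_dedup]
    have hcm : d ∉ cl := by simpa using hc
    exact List.mem_filter.mpr ⟨hd, by simp [hcm]⟩
  have h1 : pvMu ds (cl ++ [d]) = ((PySem.List.dedup (pvRest ds cl)).erase d).length :=
    (pvDedupRestPerm ds cl d).length_eq
  rw [h1, List.length_erase_of_mem hdr]
  show _ < (PySem.List.dedup (pvRest ds cl)).length
  have : 0 < (PySem.List.dedup (pvRest ds cl)).length := List.length_pos_of_mem hdr
  omega

mutual
-- literal transliteration of A: recursion over partial keys, for-loop over the digits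
def generar_combinaciones_clave (digitos_disponibles : List Int) (clave_actual : List Int) : Int :=
  if clave_actual.length = 5 then 1
  else pvALoop digitos_disponibles clave_actual digitos_disponibles.attach 0
termination_by (pvMu digitos_disponibles clave_actual, digitos_disponibles.length + 1)
decreasing_by
  exact Prod.Lex.right _ (by simp [List.length_attach])

-- the 'for digito in digitos_disponibles' loop with accumulator 'combinaciones'
-- (elements carried with their membership proof, needed only for termination)
def pvALoop (ds cl : List Int) (rest : List {x // x ∈ ds}) (acc : Int) : Int :=
  match rest with
  | [] => acc
  | d :: rs =>
    if h : cl.contains d.1 then pvALoop ds cl rs acc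
    else pvALoop ds cl rs (acc + generar_combinaciones_clave ds (cl ++ [d.1]))
termination_by (pvMu ds cl, rest.length)
decreasing_by
  all_goals first
    | exact Prod.Lex.right _ (Nat.lt_succ_self _)
    | exact Prod.Lex.left _ _ (pvMu_lt _ _ _ (Subtype.prop _) (by simp_all))
end

-- ===== PORT B =====
-- literal transliteration of B: multiplicity counter, e_k DP row, factorial loop
def generar_combinaciones_clave_alt (digitos_disponibles : List Int) (clave_actual : List Int) : Int :=
  let k : Int := 5 - (clave_actual.length : Int)
  if k < 0 then 0
  else
    let counts : PySem.Dict Int Int := digitos_disponibles.foldl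
      (fun cnts d => if clave_actual.contains d then cnts else cnts.insert d (cnts.getD d 0 + 1))
      PySem.Dict.empty
    -- e = [1] + [0]*k ; for m in counts.values(): e = [1] + [a + m*b for a, b in zip(e[1:], e)]
    -- (e[1:] on a list is exactly 'drop 1'; zip is List.zip)
    let e : List Int := counts.values.foldl
      (fun e m => 1 :: ((e.drop 1).zip e).map (fun ab => ab.1 + m * ab.2))
      (1 :: List.replicate k.toNat 0)
    let fact : Int := (PySem.List.pyRange 1 (k + 1) 1).foldl (fun f j => f * j) 1
    fact * PySem.List.pyGetD e k 0

-- ===== PRECONDITION & SPEC =====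
def Spec_generar_combinaciones_clave (digitos_disponibles : List Int) (clave_actual : List Int) (out : Int) : Prop := out = generar_combinaciones_clave_alt digitos_disponibles clave_actual
instance (digitos_disponibles : List Int) (clave_actual : List Int) (out : Int) : Decidable (Spec_generar_combinaciones_clave digitos_disponibles clave_actual out) := by unfold Spec_generar_combinaciones_clave; infer_instance

-- ===== CLAIM (what is proved, stated in full; the proofs are below) =====
def Claim_equal_generar_combinaciones_clave : Prop := ∀ (digitos_disponibles : List Int) (clave_actual : List Int), Dom_generar_combinaciones_clave digitos_disponibles clave_actual → Spec_generar_combinaciones_clave digitos_disponibles clave_actual (generar_combinaciones_clave digitos_disponibles clave_actual)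

-- ===== LEMMAS AND PROOFS =====

-- the elementary symmetric polynomial e_k (with e_k = 0 for k < 0, e_0 = 1)
def eSym : Int → List Int → Int
  | k, [] => if k = 0 then 1 else 0
  | k, x :: t => if k < 0 then 0 else if k = 0 then 1 else eSym k t + x * eSym (k - 1) t

def factInt (k : Int) : Int :=
  if h : k ≤ 0 then 1 else k * factInt (k - 1)
termination_by k.toNat
decreasing_by omega

-- the multiplicities of the distinct values of ds still available given cl
def pvMults (ds cl : List Int) : List Int :=
  (PySem.List.dedup (pvRest ds cl)).map (fun v => ((pvRest ds cl).count v : Int))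

theorem eSym_neg {k : Int} (hk : k < 0) : ∀ l : List Int, eSym k l = 0 := by
  intro l
  cases l <;> simp [eSym, hk] <;> omega

theorem eSym_zero (l : List Int) : eSym 0 l = 1 := by
  cases l <;> simp [eSym]

theorem eSym_cons (k : Int) (x : Int) (t : List Int) :
    eSym k (x :: t) = eSym k t + x * eSym (k - 1) t := by
  rcases lt_trichotomy k 0 with h | h | h
  · rw [eSym_neg h, eSym_neg h, eSym_neg (by omega : k - 1 < 0)]; ring
  · subst h
    rw [eSym_zero, eSym_zero, eSym_neg (by omega : (0:Int) - 1 < 0)]; ring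
  · simp only [eSym]
    rw [if_neg (by omega), if_neg (by omega)]

theorem eSym_perm (k : Int) {l l' : List Int} (h : l.Perm l') : eSym k l = eSym k l' := by
  induction h generalizing k with
  | nil => rfl
  | cons x _ ih => rw [eSym_cons, eSym_cons, ih, ih]
  | swap x y l =>
    rw [eSym_cons, eSym_cons, eSym_cons, eSym_cons, eSym_cons, eSym_cons]
    ring
  | trans _ _ ih1 ih2 => rw [ih1, ih2]

theorem pvSumMapAdd (l : List Int) (f g : Int → Int) :
    (l.map (fun a => f a + g a)).sum = (l.map f).sum + (l.map g).sum := by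
  induction l with
  | nil => simp
  | cons x t ih => simp [ih]; ring

theorem pvEraseMapPerm (f : Int → Int) {l : List Int} {u : Int} (hu : u ∈ l) :
    ((l.map f).erase (f u)).Perm ((l.erase u).map f) := by
  have h1 : l.Perm (u :: l.erase u) := List.perm_cons_erase hu
  have h2 : (l.map f).Perm (f u :: (l.erase u).map f) := by simpa using h1.map f
  have h3 := h2.erase (f u)
  simpa [List.erase_cons_head] using h3

theorem pvSumErase (l : List Int) : ∀ k : Int,
    (l.map (fun m => m * eSym k (l.erase m))).sum = (k + 1) * eSym (k + 1) l := by
  induction l with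
  | nil =>
    intro k
    simp [eSym]
    omega
  | cons x t ih =>
    intro k
    have hterm : ∀ m ∈ t, m * eSym k ((x :: t).erase m)
        = m * eSym k (t.erase m) + x * (m * eSym (k - 1) (t.erase m)) := by
      intro m hm
      by_cases hxm : x = m
      · subst hxm
        rw [List.erase_cons_head]
        have : eSym k (x :: t.erase x) = eSym k t := eSym_perm k (List.perm_cons_erase hm).symm
        rw [← this, eSym_cons]; ring
      · rw [List.erase_cons_tail (by simpa using hxm), eSym_cons]; ring
    calc (((x :: t).map (fun m => m * eSym k ((x :: t).erase m))).sum)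
        = x * eSym k t + (t.map (fun m => m * eSym k ((x :: t).erase m))).sum := by
          simp [List.erase_cons_head]
      _ = x * eSym k t + (t.map (fun m => m * eSym k (t.erase m) + x * (m * eSym (k - 1) (t.erase m)))).sum := by
          rw [List.map_congr_left hterm]
      _ = x * eSym k t + ((t.map (fun m => m * eSym k (t.erase m))).sum
            + (t.map (fun m => x * (m * eSym (k - 1) (t.erase m)))).sum) := by
          rw [pvSumMapAdd]
      _ = x * eSym k t + ((k + 1) * eSym (k + 1) t + x * (k * eSym k t)) := by
          rw [ih k, List.sum_map_mul_left, ih (k - 1)]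
          ring_nf
      _ = (k + 1) * eSym (k + 1) (x :: t) := by
          rw [eSym_cons (k + 1)]
          ring_nf

theorem pvDeltaSum (x : Int) (c : Int → Int) : ∀ l : List Int, l.Nodup → x ∈ l →
    (l.map (fun v => if v = x then c v else 0)).sum = c x := by
  intro l
  induction l with
  | nil => intro _ hx; cases hx
  | cons y t ih =>
    intro hnd hx
    rcases List.mem_cons.mp hx with h | h
    · have hyt : y ∉ t := (List.nodup_cons.mp hnd).1
      have hzero : (t.map (fun v => if v = x then c v else 0)).sum = 0 := by
        have hmap : t.map (fun v => if v = x then c v else 0) = t.map (fun _ => (0 : Int)) :=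
          List.map_congr_left (fun a ha => by
            have hax : a ≠ x := fun he => hyt (h ▸ he ▸ ha)
            simp [hax])
        rw [hmap]
        simp
      rw [List.map_cons, List.sum_cons, hzero, if_pos h.symm, add_zero, ← h]
    · have hyx : y ≠ x := fun he => (List.nodup_cons.mp hnd).1 (he ▸ h)
      simp [hyx, ih (List.nodup_cons.mp hnd).2 h]

-- grouping: a sum over a list is the dedup-weighted sum (Mathlib dedup version)
theorem pvGroupSumM (l : List Int) (h : Int → Int) :
    (l.map h).sum = (l.dedup.map (fun v => (l.count v : Int) * h v)).sum := by
  induction l with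
  | nil => simp
  | cons x t ih =>
    by_cases hx : x ∈ t
    · rw [List.dedup_cons_of_mem hx]
      have hstep : ∀ v ∈ t.dedup, ((x :: t).count v : Int) * h v
          = (t.count v : Int) * h v + (if v = x then h v else 0) := by
        intro v _
        by_cases hvx : v = x
        · subst hvx
          rw [if_pos rfl, List.count_cons_self]
          push_cast; ring
        · rw [if_neg hvx, List.count_cons]
          have hbv : ¬ (x == v) = true := by simpa using Ne.symm hvx
          rw [if_neg hbv]
          push_cast
          ring
      rw [List.map_cons, List.sum_cons, ih, List.map_congr_left hstep, pvSumMapAdd,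
        pvDeltaSum x h t.dedup (List.nodup_dedup t) (List.mem_dedup.mpr hx)]
      ring
    · rw [List.dedup_cons_of_notMem hx]
      have hhead : ((x :: t).count x : Int) = 1 := by
        rw [List.count_cons_self, List.count_eq_zero_of_not_mem hx]
        simp
      have htail : ∀ v ∈ t.dedup, ((x :: t).count v : Int) * h v = (t.count v : Int) * h v := by
        intro v hv
        have hvx : v ≠ x := fun he => hx (he ▸ List.mem_dedup.mp hv)
        have hbv : ¬ (x == v) = true := by simpa using Ne.symm hvx
        rw [List.count_cons, if_neg hbv]
        push_cast
        ring
      rw [List.map_cons, List.sum_cons, List.map_cons, List.sum_cons, hhead,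
        List.map_congr_left htail, ← ih]
      ring

-- same grouping stated with PySem's (first-occurrence) dedup
theorem pvGroupSum (l : List Int) (h : Int → Int) :
    (l.map h).sum = ((PySem.List.dedup l).map (fun v => (l.count v : Int) * h v)).sum := by
  rw [pvGroupSumM]
  have hp : (l.dedup).Perm (PySem.List.dedup l) :=
    pvPermOfNodup (List.nodup_dedup l) (PySem.List.nodup_dedup l)
      (fun x => by rw [List.mem_dedup, PySem.List.mem_dedup])
  exact (hp.map _).sum_eq

theorem pvSumIfZero (ds : List Int) (p : Int → Bool) (X : Int → Int) :
    (ds.map (fun d => if p d then 0 else X d)).sum = ((ds.filter (fun d => !p d)).map X).sum := by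
  induction ds with
  | nil => simp
  | cons x t ih => cases hp : p x <;> simp [hp, ih]

theorem pvMultsStep (ds cl : List Int) (d : Int) (hd : d ∈ pvRest ds cl) (k : Int) :
    eSym k (pvMults ds (cl ++ [d]))
      = eSym k ((pvMults ds cl).erase (((pvRest ds cl).count d : Int))) := by
  apply eSym_perm
  have hdd : d ∈ PySem.List.dedup (pvRest ds cl) := (PySem.List.mem_dedup _ _).mpr hd
  have h1 : pvMults ds (cl ++ [d])
      = (PySem.List.dedup (pvRest ds (cl ++ [d]))).map (fun v => ((pvRest ds cl).count v : Int)) := by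
    unfold pvMults
    apply List.map_congr_left
    intro v hv
    have hv' := (PySem.List.mem_dedup _ _).mp hv
    rw [pvRest_append] at hv'
    have hvd : (v == d) = false := by
      have := (List.mem_filter.mp hv').2
      simpa using this
    rw [pvRest_append, List.count_filter]
    simp [hvd]
  rw [h1]
  calc ((PySem.List.dedup (pvRest ds (cl ++ [d]))).map (fun v => ((pvRest ds cl).count v : Int)))
      |>.Perm (((PySem.List.dedup (pvRest ds cl)).erase d).map (fun v => ((pvRest ds cl).count v : Int))) :=
        (pvDedupRestPerm ds cl d).map _
    _ |>.Perm ((pvMults ds cl).erase (((pvRest ds cl).count d : Int))) :=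
        (pvEraseMapPerm (fun v => ((pvRest ds cl).count v : Int)) hdd).symm

theorem pvALoopSum (ds cl : List Int) : ∀ (rest : List {x // x ∈ ds}) (acc : Int),
    pvALoop ds cl rest acc
      = acc + (rest.map (fun d => if cl.contains d.1 then 0
          else generar_combinaciones_clave ds (cl ++ [d.1]))).sum := by
  intro rest
  induction rest with
  | nil => intro acc; simp [pvALoop]
  | cons d rs ih =>
    intro acc
    rw [pvALoop]
    by_cases h : cl.contains d.1
    · rw [dif_pos h, ih, List.map_cons, List.sum_cons, if_pos h]; ring
    · rw [dif_neg h, ih, List.map_cons, List.sum_cons, if_neg h]; ring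

-- A computes the closed form: k! * e_k of the available multiplicities
theorem pvMain (ds : List Int) : ∀ (n : Nat) (cl : List Int), pvMu ds cl ≤ n →
    generar_combinaciones_clave ds cl
      = factInt (5 - (cl.length : Int)) * eSym (5 - (cl.length : Int)) (pvMults ds cl) := by
  intro n
  induction n using Nat.strong_induction_on with
  | _ n ih =>
    intro cl hmu
    by_cases h5 : cl.length = 5
    · have hc5 : (cl.length : Int) = 5 := by rw [h5]; norm_num
      have hf0 : factInt 0 = 1 := by unfold factInt; norm_num
      rw [generar_combinaciones_clave, if_pos h5, hc5]
      norm_num [eSym_zero, hf0]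
    · have hk0 : 5 - (cl.length : Int) ≠ 0 := by omega
      set k : Int := 5 - (cl.length : Int) with hk
      rw [generar_combinaciones_clave, if_neg h5, pvALoopSum, zero_add]
      have hattach : (ds.attach.map (fun d => if cl.contains d.1 then 0
            else generar_combinaciones_clave ds (cl ++ [d.1]))).sum
          = (ds.map (fun d => if cl.contains d then 0
            else generar_combinaciones_clave ds (cl ++ [d]))).sum := by
        congr 1
        exact List.attach_map_val (l := ds)
          (f := fun d => if cl.contains d = true then 0 else generar_combinaciones_clave ds (cl ++ [d]))
      rw [hattach, pvSumIfZero]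
      have hfold : List.filter (fun d => !cl.contains d) ds = pvRest ds cl := rfl
      rw [hfold]
      have hterm : ∀ d ∈ pvRest ds cl,
          generar_combinaciones_clave ds (cl ++ [d])
            = factInt (k - 1) * eSym (k - 1) ((pvMults ds cl).erase (((pvRest ds cl).count d : Int))) := by
        intro d hd
        have hdm := List.mem_filter.mp hd
        have hlt : pvMu ds (cl ++ [d]) < pvMu ds cl :=
          pvMu_lt ds cl d hdm.1 (by simpa using hdm.2)
        have := ih (pvMu ds (cl ++ [d])) (lt_of_lt_of_le hlt hmu) (cl ++ [d]) le_rfl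
        rw [this, pvMultsStep ds cl d hd]
        congr 2 <;> · simp; omega
      rw [List.map_congr_left hterm]
      have hgroup := pvGroupSum (pvRest ds cl)
        (fun d => factInt (k - 1) * eSym (k - 1) ((pvMults ds cl).erase (((pvRest ds cl).count d : Int))))
      rw [hgroup]
      have hpull : ∀ v ∈ PySem.List.dedup (pvRest ds cl),
          ((pvRest ds cl).count v : Int)
              * (factInt (k - 1) * eSym (k - 1) ((pvMults ds cl).erase (((pvRest ds cl).count v : Int))))
            = factInt (k - 1) * (((pvRest ds cl).count v : Int)
              * eSym (k - 1) ((pvMults ds cl).erase (((pvRest ds cl).count v : Int)))) := by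
        intro v _; ring
      rw [List.map_congr_left hpull, List.sum_map_mul_left]
      have hinner : ((PySem.List.dedup (pvRest ds cl)).map (fun v => ((pvRest ds cl).count v : Int)
            * eSym (k - 1) ((pvMults ds cl).erase (((pvRest ds cl).count v : Int))))).sum
          = ((pvMults ds cl).map (fun m => m * eSym (k - 1) ((pvMults ds cl).erase m))).sum := by
        unfold pvMults
        rw [List.map_map]
        rfl
      rw [hinner, pvSumErase, (by ring : k - 1 + 1 = k)]
      rcases lt_or_gt_of_ne hk0 with hneg | hpos
      · rw [eSym_neg hneg]; ring
      · have hfk : factInt k = k * factInt (k - 1) := by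
          rw [factInt, dif_neg (by omega : ¬ k ≤ 0)]
        rw [hfk]; ring

-- ===== B-side lemmas =====

theorem pvStepRow (k : Nat) (t : List Int) (m : Int) :
    (1 : Int) :: (((((List.range (k + 1)).map (fun j : Nat => eSym (j : Int) t)).drop 1).zip
        ((List.range (k + 1)).map (fun j : Nat => eSym (j : Int) t))).map (fun ab => ab.1 + m * ab.2))
      = (List.range (k + 1)).map (fun j : Nat => eSym (j : Int) (m :: t)) := by
  apply List.ext_getElem
  · simp
  · intro i h1 h2
    match i with
    | 0 => simp [eSym_zero]
    | j + 1 =>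
      simp only [List.getElem_cons_succ, List.getElem_map, List.getElem_zip, List.getElem_drop,
        List.getElem_range]
      rw [eSym_cons]
      push_cast
      ring_nf

theorem pvRowFold (k : Nat) : ∀ (ms t : List Int),
    ms.foldl (fun e m => 1 :: ((e.drop 1).zip e).map (fun ab => ab.1 + m * ab.2))
        ((List.range (k + 1)).map (fun j : Nat => eSym (j : Int) t))
      = (List.range (k + 1)).map (fun j : Nat => eSym (j : Int) (ms.reverse ++ t)) := by
  intro ms
  induction ms with
  | nil => intro t; simp
  | cons m ms ih =>
    intro t
    rw [List.foldl_cons, pvStepRow, ih (m :: t)]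
    congr 1
    simp

theorem pvRowInit (k : Nat) :
    (1 : Int) :: List.replicate k 0 = (List.range (k + 1)).map (fun j : Nat => eSym (j : Int) []) := by
  apply List.ext_getElem
  · simp
  · intro i h1 h2
    match i with
    | 0 => simp [eSym]
    | j + 1 =>
      simp [eSym, List.getElem_replicate]

theorem pvFact (n : Nat) :
    (PySem.List.pyRange 1 ((n : Int) + 1) 1).foldl (fun f j => f * j) 1 = factInt n := by
  induction n with
  | zero => simp [PySem.List.pyRange, factInt]
  | succ n ih =>
    have : ((n : Int) + 1 + 1) = ((n : Int) + 1) + 1 := by ring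
    rw [(by push_cast; ring : ((n + 1 : Nat) : Int) + 1 = ((n : Int) + 1) + 1),
      PySem.List.pyRange_one_succ_right (by omega), List.foldl_append, List.foldl_cons,
      List.foldl_nil, ih]
    have hfk : factInt ((n + 1 : Nat) : Int) = ((n + 1 : Nat) : Int) * factInt (((n + 1 : Nat) : Int) - 1) := by
      rw [factInt]
      rw [dif_neg (by push_cast; omega)]
    have harg : ((n + 1 : Nat) : Int) - 1 = (n : Int) := by push_cast; ring
    rw [hfk, harg]
    push_cast
    ring

-- ===== VERDICT (by name: the statement is the Claim_ definition above) =====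
theorem generar_combinaciones_clave_spec : Claim_equal_generar_combinaciones_clave := by
  intro ds cl _
  unfold Spec_generar_combinaciones_clave generar_combinaciones_clave_alt
  set k : Int := 5 - (cl.length : Int) with hk
  have hA := pvMain ds (pvMu ds cl) cl le_rfl
  by_cases hneg : k < 0
  · rw [if_pos hneg, hA, eSym_neg hneg]
    ring
  · rw [if_neg hneg]
    -- the counter loop is Counter(pvRest ds cl)
    have hcnt : ds.foldl (fun cnts d => if cl.contains d then cnts
          else cnts.insert d (cnts.getD d 0 + 1)) (PySem.Dict.empty : PySem.Dict Int Int)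
        = PySem.Dict.counter (pvRest ds cl) := by
      have h1 : ds.foldl (fun cnts d => if cl.contains d then cnts
            else cnts.insert d (cnts.getD d 0 + 1)) (PySem.Dict.empty : PySem.Dict Int Int)
          = ds.foldl (fun (cnts : PySem.Dict Int Int) d => if !cl.contains d
            then cnts.insert d (cnts.getD d 0 + 1) else cnts) PySem.Dict.empty :=
        by apply PySem.List.foldl_congr_mem; intro acc x _; cases hx : cl.contains x <;> simp [hx]
      rw [h1, PySem.List.foldl_if_eq_foldl_filter]
      exact PySem.Dict.foldl_insert_getD_add_one_eq_counter _
    have hvals : (PySem.Dict.counter (pvRest ds cl)).values = pvMults ds cl := by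
      have hitems := PySem.Dict.items_counter (xs := pvRest ds cl)
      show (PySem.Dict.counter (pvRest ds cl)).items.map (·.2) = _
      rw [hitems, List.map_map]
      unfold pvMults
      simp [PySem.List.dedup_eq_ofList]
    simp only [hcnt, hvals]
    have hkn : k = (k.toNat : Int) := by omega
    have hrow := pvRowFold k.toNat (pvMults ds cl) []
    rw [hkn]
    simp only [Int.toNat_natCast]
    rw [pvRowInit k.toNat, hrow, pvFact k.toNat]
    have hget : PySem.List.pyGetD ((List.range (k.toNat + 1)).map
          (fun j : Nat => eSym (j : Int) ((pvMults ds cl).reverse ++ []))) (k.toNat : Int) 0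
        = eSym ((k.toNat : Int)) ((pvMults ds cl).reverse ++ []) := by
      rw [PySem.List.pyGetD_natCast]
      rw [List.getD_eq_getElem?_getD]
      simp
    rw [hget]
    have hperm : eSym ((k.toNat : Int)) ((pvMults ds cl).reverse ++ [])
        = eSym ((k.toNat : Int)) (pvMults ds cl) := by
      apply eSym_perm
      simp
    rw [hperm, hA, ← hkn]
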